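-- pv_equiv track=rewrite | github.com/jupyter-ai-contrib/jupyter-scheduler-k8s | jupyter_scheduler_k8s/scheduler.py | _convert_schedule_to_cron
-- ===== SOURCE A (Python) =====
-- def _convert_schedule_to_cron(schedule: str) -> str:
--     """Convert jupyter-scheduler schedule format to K8s cron format.
--
--     Only handles day name to number conversion (MON -> 1).
--     Timezone handling is delegated to K8s native support (1.27+).
--     """
--     if not schedule:
--         raise ValueError("Schedule cannot be empty")
--
--     # Day name to number conversion for K8s cron format
--     DAY_MAP = {
--         'MON': '1', 'TUE': '2', 'WED': '3', 'THU': '4',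
--         'FRI': '5', 'SAT': '6', 'SUN': '0'
--     }
--
--     cron = schedule
--     for day_name, day_num in DAY_MAP.items():
--         cron = cron.replace(day_name, day_num)
--
--     return cron
-- ===== SOURCE B (Python) =====
-- def _convert_schedule_to_cron(schedule: str) -> str:
--     """Convert jupyter-scheduler schedule format to K8s cron format.
--
--     Single left-to-right pass: at each position try the 3-char token against
--     DAY_MAP instead of seven full-string replace scans.
--     """
--     if not schedule:
--         raise ValueError("Schedule cannot be empty")
--
--     DAY_MAP = {
--         'MON': '1', 'TUE': '2', 'WED': '3', 'THU': '4',
--         'FRI': '5', 'SAT': '6', 'SUN': '0'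
--     }
--
--     out = []
--     i = 0
--     n = len(schedule)
--     while i < n:
--         token = schedule[i:i + 3]
--         if token in DAY_MAP:
--             out.append(DAY_MAP[token])
--             i += 3
--         else:
--             out.append(schedule[i])
--             i += 1
--     return "".join(out)
-- ===== Notes on version B (the rewrite author's own statement) =====
-- stated objective: alternative
-- what changed: Seven sequential full-string str.replace passes are replaced by a single left-to-right scan that tests the 3-character token at each position against DAY_MAP and advances by 3 on a match.
-- outside the precondition, e.g. on _convert_schedule_to_cron('SATUE'): A returns 'SA2', B returns '6UE'; on _convert_schedule_to_cron('SATHU'): A returns 'SA4', B returns '6HU'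
import Mathlib
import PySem

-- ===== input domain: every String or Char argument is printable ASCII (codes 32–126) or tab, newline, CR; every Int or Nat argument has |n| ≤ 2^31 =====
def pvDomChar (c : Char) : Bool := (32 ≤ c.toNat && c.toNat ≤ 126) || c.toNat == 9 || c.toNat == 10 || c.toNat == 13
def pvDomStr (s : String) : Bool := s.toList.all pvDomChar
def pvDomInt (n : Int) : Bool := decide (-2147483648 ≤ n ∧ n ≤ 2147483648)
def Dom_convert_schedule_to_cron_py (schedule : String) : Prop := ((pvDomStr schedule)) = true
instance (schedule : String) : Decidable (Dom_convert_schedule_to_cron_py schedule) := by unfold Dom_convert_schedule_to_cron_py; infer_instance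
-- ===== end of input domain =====

-- B replaces A's seven sequential full-string `.replace` passes by one left-to-right scan that
-- matches the 3-character token at each position against the day map (objective: alternative).


-- ===== PORT A =====
-- `if not schedule: raise ValueError(...)` — the empty schedule raises; it is excluded by Pre_.
def convert_schedule_to_cron_py (schedule : String) : String :=
  let dayMap : PySem.Dict String String :=
    (((((((PySem.Dict.empty.insert "MON" "1").insert "TUE" "2").insert "WED" "3").insert
        "THU" "4").insert "FRI" "5").insert "SAT" "6").insert "SUN" "0")
  dayMap.items.foldl (fun cron p => PySem.Str.replace cron p.1 p.2) schedule

-- ===== PORT B =====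
-- DAY_MAP of Source B as an association list over code points (keys are the 3-letter day tokens).
def pvDayList : List (List Char × List Char) :=
  [(['M','O','N'], ['1']), (['T','U','E'], ['2']), (['W','E','D'], ['3']),
   (['T','H','U'], ['4']), (['F','R','I'], ['5']), (['S','A','T'], ['6']), (['S','U','N'], ['0'])]

-- Source B's while-loop: token = schedule[i:i+3]; if token in DAY_MAP emit the digit and advance 3,
-- else emit the char and advance 1 (the `out` list and the final join are fused into list append).
def pvScanB : List Char → List Char
  | [] => []
  | c :: t =>
    match pvDayList.find? (fun p => p.1 == (c :: t).take 3) with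
    | some p => p.2 ++ pvScanB (t.drop 2)
    | none => c :: pvScanB t
termination_by l => l.length
decreasing_by
  all_goals simp

-- empty schedule raises (excluded by Pre_); otherwise one pass over the string.
def convert_schedule_to_cron_py_alt (schedule : String) : String :=
  String.ofList (pvScanB schedule.toList)

-- ===== PRECONDITION & SPEC =====
-- Pre_ excludes (a) the empty schedule, on which BOTH programs raise ValueError, and (b) schedules
-- containing "SATUE" or "SATHU" — the only way a SAT occurrence overlaps a TUE/THU occurrence:
-- there A's dict-order replace passes and B's left-to-right matching are both defensible readings
-- of an unspecified corner and give different results.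
def Pre_convert_schedule_to_cron_py (schedule : String) : Prop :=
  schedule ≠ "" ∧ PySem.Str.isIn "SATUE" schedule = false ∧ PySem.Str.isIn "SATHU" schedule = false
instance (schedule : String) : Decidable (Pre_convert_schedule_to_cron_py schedule) := by
  unfold Pre_convert_schedule_to_cron_py; infer_instance

def pvWitness_convert_schedule_to_cron_py : String := "0 9 * * MON-FRI"

def Spec_convert_schedule_to_cron_py (schedule : String) (out : String) : Prop :=
  out = convert_schedule_to_cron_py_alt schedule
instance (schedule : String) (out : String) : Decidable (Spec_convert_schedule_to_cron_py schedule out) := by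
  unfold Spec_convert_schedule_to_cron_py; infer_instance

-- ===== CLAIM (what is proved, stated in full; the proofs are below) =====
def Claim_equal_convert_schedule_to_cron_py : Prop :=
  ∀ (schedule : String), Dom_convert_schedule_to_cron_py schedule →
    Pre_convert_schedule_to_cron_py schedule →
    Spec_convert_schedule_to_cron_py schedule (convert_schedule_to_cron_py schedule)

-- ===== LEMMAS AND PROOFS =====

def repOne (old new : List Char) : List Char → List Char
  | [] => []
  | c :: t =>
    if old.isPrefixOf (c :: t) then new ++ repOne old new (t.drop (old.length - 1))
    else c :: repOne old new t
termination_by l => l.length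
decreasing_by
  all_goals simp

def repM (ts : List (List Char × List Char)) : List Char → List Char
  | [] => []
  | c :: t =>
    match ts.find? (fun p => p.1.isPrefixOf (c :: t)) with
    | some p => p.2 ++ repM ts (t.drop (p.1.length - 1))
    | none => c :: repM ts t
termination_by l => l.length
decreasing_by
  all_goals simp

theorem replace_go_eq (old new : List Char) (hold : old ≠ []) :
    ∀ fuel l acc, l.length ≤ fuel →
      PySem.Chars.replace.go old new fuel l acc = acc.reverse ++ repOne old new l := by
  intro fuel
  induction fuel with
  | zero =>
    intro l acc hlen
    have : l = [] := by cases l <;> simp_all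
    subst this
    simp [PySem.Chars.replace.go, repOne]
  | succ f ih =>
    intro l acc hlen
    cases l with
    | nil => simp [PySem.Chars.replace.go, repOne]
    | cons c t =>
      rw [PySem.Chars.replace.go]
      simp only [List.length_cons] at hlen
      by_cases hp : old.isPrefixOf (c :: t)
      · simp only [hp, if_true]
        have hol : 0 < old.length := List.length_pos_of_ne_nil hold
        have hdrop : (c :: t).drop old.length = t.drop (old.length - 1) := by
          cases old with
          | nil => simp_all
          | cons o os => simp
        rw [hdrop]
        rw [ih (t.drop (old.length - 1)) (new.reverse ++ acc) (by simp [List.length_drop]; omega)]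
        rw [repOne]
        simp [hp]
      · simp only [hp]
        rw [ih t (c :: acc) (by omega)]
        rw [repOne]
        simp [hp]

theorem replace_eq_repOne (s old new : List Char) (hold : old ≠ []) :
    PySem.Chars.replace s old new = repOne old new s := by
  rw [PySem.Chars.replace]
  simp only [List.isEmpty_iff, hold, if_false]
  rw [replace_go_eq old new hold s.length s [] (le_refl _)]
  simp

theorem repM_nil (l : List Char) : repM [] l = l := by
  induction l with
  | nil => simp [repM]
  | cons c t ih => simp [repM, ih]

theorem beq_take3 (a b c' : Char) (l : List Char) :
    ([a,b,c'] == l.take 3) = [a,b,c'].isPrefixOf l := by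
  by_cases h : ([a,b,c'] : List Char) <+: l
  · have h1 : [a,b,c'].isPrefixOf l = true := List.isPrefixOf_iff_prefix.mpr h
    have h2 : [a,b,c'] = l.take 3 := by simpa using List.prefix_iff_eq_take.mp h
    rw [h1, ← h2, beq_self_eq_true]
  · have h1 : [a,b,c'].isPrefixOf l = false := by
      simp only [Bool.eq_false_iff, ne_eq, List.isPrefixOf_iff_prefix]
      exact h
    have h2 : ¬ ([a,b,c'] = l.take 3) :=
      fun hh => h (List.prefix_iff_eq_take.mpr (by simpa using hh))
    rw [h1]
    simpa using h2

theorem find?_congr_mem {α : Type} (p q : α → Bool) (l : List α) (h : ∀ a ∈ l, p a = q a) :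
    l.find? p = l.find? q := by
  induction l with
  | nil => rfl
  | cons x xs ih =>
    rw [List.find?_cons, List.find?_cons, h x (by simp)]
    cases q x
    · exact ih (fun a ha => h a (by simp [ha]))
    · rfl

theorem pvScanB_eq_repM (l : List Char) : pvScanB l = repM pvDayList l := by
  induction l using pvScanB.induct with
  | case1 => simp [pvScanB, repM]
  | case2 c t p hfind ih =>
    rw [pvScanB, repM]
    have hf2 : pvDayList.find? (fun p => p.1.isPrefixOf (c :: t)) = some p := by
      rw [← hfind]
      apply find?_congr_mem
      intro a ha
      fin_cases ha <;> exact (beq_take3 _ _ _ _).symm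
    rw [hfind, hf2]
    have hlen : p.1.length = 3 := by
      have := List.mem_of_find?_eq_some hfind
      fin_cases this <;> rfl
    simp [hlen, ih]
  | case3 c t hfind ih =>
    rw [pvScanB, repM]
    have hf2 : pvDayList.find? (fun p => p.1.isPrefixOf (c :: t)) = none := by
      rw [← hfind]
      apply find?_congr_mem
      intro a ha
      fin_cases ha <;> exact (beq_take3 _ _ _ _).symm
    rw [hfind, hf2, ih]

theorem repM_take_upper (ts : List (List Char × List Char))
    (hv : ∀ p ∈ ts, ∀ c ∈ p.2, ¬ c.isUpper = true) (hvne : ∀ p ∈ ts, p.2 ≠ []) :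
    ∀ l k, (∀ c ∈ (repM ts l).take k, c.isUpper = true) → (repM ts l).take k = l.take k := by
  intro l
  induction l using repM.induct ts with
  | case1 => simp [repM]
  | case2 c t p hfind ih =>
    intro k hk
    rw [repM, hfind] at hk ⊢
    cases k with
    | zero => simp
    | succ k' =>
      cases hp2 : p.2 with
      | nil =>
        exact absurd hp2 (hvne p (List.mem_of_find?_eq_some hfind))
      | cons e u =>
        exfalso
        have he : e.isUpper = true := by
          apply hk
          simp [hp2]
        exact hv p (List.mem_of_find?_eq_some hfind) e (by simp [hp2]) he
  | case3 c t hfind ih =>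
    intro k hk
    rw [repM, hfind] at hk ⊢
    cases k with
    | zero => simp
    | succ k' =>
      simp only [List.take_succ_cons] at hk ⊢
      rw [ih k' (fun c hc => hk c (by simp [hc]))]

theorem not_prefix_repM (ts : List (List Char × List Char))
    (hv : ∀ p ∈ ts, ∀ c ∈ p.2, ¬ c.isUpper = true) (hvne : ∀ p ∈ ts, p.2 ≠ [])
    (d : List Char) (hd_up : ∀ c ∈ d, c.isUpper = true)
    (c : Char) (t : List Char) (h : ¬ d <+: c :: t) : ¬ d <+: c :: repM ts t := by
  intro hpre
  apply h
  cases d with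
  | nil => simp
  | cons a d0 =>
    rw [List.cons_prefix_cons] at hpre ⊢
    obtain ⟨rfl, hd0⟩ := hpre
    refine ⟨rfl, ?_⟩
    have htake : d0 = (repM ts t).take d0.length := List.prefix_iff_eq_take.mp hd0
    have hup : ∀ x ∈ (repM ts t).take d0.length, x.isUpper = true := by
      intro x hx
      rw [← htake] at hx
      exact hd_up x (by simp [hx])
    have h2 : (repM ts t).take d0.length = t.take d0.length :=
      repM_take_upper ts hv hvne t d0.length hup
    exact List.prefix_iff_eq_take.mpr (htake.trans h2)

theorem repOne_skip_lower (d v : List Char) (a : Char) (d0 : List Char) (hd : d = a :: d0)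
    (ha : a.isUpper = true) :
    ∀ u X, (∀ c ∈ u, ¬ c.isUpper = true) → repOne d v (u ++ X) = u ++ repOne d v X := by
  intro u
  induction u with
  | nil => simp
  | cons e u' ih =>
    intro X hu
    have hnp : d.isPrefixOf (e :: (u' ++ X)) = false := by
      subst hd
      have hne : ¬ a = e := fun hh => hu e (by simp) (hh ▸ ha)
      simp only [Bool.eq_false_iff, ne_eq, List.isPrefixOf_iff_prefix, List.cons_prefix_cons]
      exact fun hh => hne hh.1
    rw [List.cons_append, repOne, hnp]
    simp only [Bool.false_eq_true, if_false]
    rw [ih X (fun c hc => hu c (by simp [hc]))]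
    rfl

theorem repM_copy (ts : List (List Char × List Char)) :
    ∀ u r, (∀ j, j < u.length → ∀ p ∈ ts, ¬ p.1 <+: (u ++ r).drop j) →
      repM ts (u ++ r) = u ++ repM ts r := by
  intro u
  induction u with
  | nil => simp
  | cons c u' ih =>
    intro r h
    have hfind : ts.find? (fun p => p.1.isPrefixOf (c :: (u' ++ r))) = none := by
      rw [List.find?_eq_none]
      intro p hp
      simp only [List.isPrefixOf_iff_prefix]
      exact fun hc => h 0 (by simp) p hp (by simpa using hc)
    rw [List.cons_append, repM, hfind]
    rw [ih r (fun j hj p hp => by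
      have := h (j+1) (by simpa using Nat.succ_lt_succ hj) p hp
      simpa using this)]
    rfl

theorem fuse (ts : List (List Char × List Char)) (d v : List Char)
    (a : Char) (d0 : List Char) (hdc : d = a :: d0) (ha : a.isUpper = true)
    (hd_up : ∀ c ∈ d, c.isUpper = true)
    (hv : ∀ p ∈ ts, ∀ c ∈ p.2, ¬ c.isUpper = true) (hvne : ∀ p ∈ ts, p.2 ≠ []) :
    ∀ l, (∀ s, s <:+ l → d <+: s → ∀ p ∈ ts, ∀ j, 0 < j → j < d.length → ¬ p.1 <+: s.drop j) →
      repOne d v (repM ts l) = repM (ts ++ [(d, v)]) l := by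
  suffices h : ∀ n l, l.length ≤ n →
      (∀ s, s <:+ l → d <+: s → ∀ p ∈ ts, ∀ j, 0 < j → j < d.length → ¬ p.1 <+: s.drop j) →
      repOne d v (repM ts l) = repM (ts ++ [(d, v)]) l by
    intro l; exact h l.length l (le_refl _)
  intro n
  induction n with
  | zero =>
    intro l hl hov
    have : l = [] := by cases l <;> simp_all
    subst this
    simp [repM, repOne]
  | succ n ih =>
    intro l hl hov
    cases l with
    | nil => simp [repM, repOne]
    | cons c t =>
      simp only [List.length_cons] at hl
      have hov' : ∀ (u : List Char), u <:+ c :: t →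
          (∀ s, s <:+ u → d <+: s → ∀ p ∈ ts, ∀ j, 0 < j → j < d.length → ¬ p.1 <+: s.drop j) :=
        fun u hu s hs hd' p hp j hj1 hj2 => hov s (hs.trans hu) hd' p hp j hj1 hj2
      cases hfind : ts.find? (fun p => p.1.isPrefixOf (c :: t)) with
      | some p =>
        have hpmem := List.mem_of_find?_eq_some hfind
        have hfind2 : (ts ++ [(d, v)]).find? (fun p => p.1.isPrefixOf (c :: t)) = some p := by
          rw [List.find?_append, hfind]; rfl
        rw [repM, hfind, repM, hfind2]
        rw [repOne_skip_lower d v a d0 hdc ha p.2 _ (hv p hpmem)]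
        rw [ih (t.drop (p.1.length - 1)) (by simp; omega)
            (hov' _ ((List.drop_suffix _ t).trans (List.suffix_cons c t)))]
      | none =>
        have hnone : ∀ p ∈ ts, ¬ p.1 <+: c :: t := by
          intro p hp
          have := List.find?_eq_none.mp hfind p hp
          simpa [List.isPrefixOf_iff_prefix] using this
        by_cases hdp : d <+: c :: t
        · obtain ⟨r, hr⟩ := hdp
          have hcopy : repM ts (c :: t) = d ++ repM ts r := by
            rw [← hr]
            apply repM_copy
            intro j hj p hp
            cases j with
            | zero =>
              simpa [hr] using hnone p hp
            | succ j' =>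
              rw [hr]
              exact hov (c :: t) (List.suffix_refl _) ⟨r, hr⟩ p hp (j' + 1) (by omega) hj
          have ht : t = d0 ++ r := by
            rw [hdc] at hr
            exact (by simp_all : c = a ∧ t = d0 ++ r).2
          have hrlen : r.length ≤ n := by
            have : t.length = d0.length + r.length := by rw [ht]; simp
            omega
          have hstep : repOne d v (d ++ repM ts r) = v ++ repOne d v (repM ts r) := by
            rw [hdc, List.cons_append, repOne]
            have hpref : (a :: d0).isPrefixOf (a :: (d0 ++ repM ts r)) = true := by
              simp [List.isPrefixOf_iff_prefix, List.prefix_append]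
            rw [hpref]
            simp
          have hfind4 : (ts ++ [(d, v)]).find? (fun p => p.1.isPrefixOf (c :: t)) = some (d, v) := by
            rw [List.find?_append, hfind]
            simp only [Option.none_or, List.find?_cons, List.find?_nil]
            rw [List.isPrefixOf_iff_prefix.mpr ⟨r, hr⟩]
          rw [hcopy, hstep, repM, hfind4]
          simp only []
          have hdrop : t.drop (d.length - 1) = r := by
            rw [ht, hdc]
            simp
          rw [hdrop]
          rw [ih r hrlen (hov' r ⟨d, hr⟩)]
        · rw [repM, hfind]
          have hnp2 : d.isPrefixOf (c :: repM ts t) = false := by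
            simp only [Bool.eq_false_iff, ne_eq, List.isPrefixOf_iff_prefix]
            exact not_prefix_repM ts hv hvne d hd_up c t hdp
          rw [repOne, hnp2]
          simp only [Bool.false_eq_true, if_false]
          have hfind3 : (ts ++ [(d, v)]).find? (fun p => p.1.isPrefixOf (c :: t)) = none := by
            rw [List.find?_append, hfind]
            simp only [Option.none_or]
            simp only [List.find?_cons, List.find?_nil]
            have : d.isPrefixOf (c :: t) = false := by
              simp only [Bool.eq_false_iff, ne_eq, List.isPrefixOf_iff_prefix]
              exact hdp
            rw [this]
          rw [repM, hfind3]
          rw [ih t (by omega) (hov' t (List.suffix_cons c t))]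

theorem hov_headmiss (d : List Char) (ts : List (List Char × List Char))
    (hall : ∀ p ∈ ts, ∀ r : List Char, ∀ j : ℕ, 0 < j → j < d.length → ¬ p.1 <+: (d ++ r).drop j) :
    ∀ (cs : List Char) (s : List Char), s <:+ cs → d <+: s → ∀ p ∈ ts, ∀ j : ℕ,
      0 < j → j < d.length → ¬ p.1 <+: s.drop j := by
  intro cs s _ hd p hp j hj1 hj2
  obtain ⟨r, rfl⟩ := hd
  exact hall p hp r j hj1 hj2

theorem hovTUE : ∀ p ∈ ([(['M','O','N'],['1'])] : List (List Char × List Char)),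
    ∀ r : List Char, ∀ j : ℕ, 0 < j → j < 3 → ¬ p.1 <+: (['T','U','E'] ++ r).drop j := by
  intro p hp r j hj1 hj2
  interval_cases j <;> fin_cases hp <;> simp [List.cons_prefix_cons]

theorem hovWED : ∀ p ∈ ([(['M','O','N'],['1']),(['T','U','E'],['2'])] : List (List Char × List Char)),
    ∀ r : List Char, ∀ j : ℕ, 0 < j → j < 3 → ¬ p.1 <+: (['W','E','D'] ++ r).drop j := by
  intro p hp r j hj1 hj2
  interval_cases j <;> fin_cases hp <;> simp [List.cons_prefix_cons]

theorem hovTHU : ∀ p ∈ ([(['M','O','N'],['1']),(['T','U','E'],['2']),(['W','E','D'],['3'])] : List (List Char × List Char)),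
    ∀ r : List Char, ∀ j : ℕ, 0 < j → j < 3 → ¬ p.1 <+: (['T','H','U'] ++ r).drop j := by
  intro p hp r j hj1 hj2
  interval_cases j <;> fin_cases hp <;> simp [List.cons_prefix_cons]

theorem hovFRI : ∀ p ∈ ([(['M','O','N'],['1']),(['T','U','E'],['2']),(['W','E','D'],['3']),(['T','H','U'],['4'])] : List (List Char × List Char)),
    ∀ r : List Char, ∀ j : ℕ, 0 < j → j < 3 → ¬ p.1 <+: (['F','R','I'] ++ r).drop j := by
  intro p hp r j hj1 hj2
  interval_cases j <;> fin_cases hp <;> simp [List.cons_prefix_cons]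

theorem hovSUN : ∀ p ∈ ([(['M','O','N'],['1']),(['T','U','E'],['2']),(['W','E','D'],['3']),(['T','H','U'],['4']),(['F','R','I'],['5']),(['S','A','T'],['6'])] : List (List Char × List Char)),
    ∀ r : List Char, ∀ j : ℕ, 0 < j → j < 3 → ¬ p.1 <+: (['S','U','N'] ++ r).drop j := by
  intro p hp r j hj1 hj2
  interval_cases j <;> fin_cases hp <;> simp [List.cons_prefix_cons]

theorem hovSAT (cs : List Char)
    (hA : ¬ (['S','A','T','U','E'] <:+: cs)) (hB : ¬ (['S','A','T','H','U'] <:+: cs)) :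
    ∀ s, s <:+ cs → ['S','A','T'] <+: s →
      ∀ p ∈ ([(['M','O','N'],['1']),(['T','U','E'],['2']),(['W','E','D'],['3']),(['T','H','U'],['4']),(['F','R','I'],['5'])] : List (List Char × List Char)),
      ∀ j : ℕ, 0 < j → j < 3 → ¬ p.1 <+: s.drop j := by
  intro s hs hd p hp j hj1 hj2
  obtain ⟨r, rfl⟩ := hd
  fin_cases hp <;> interval_cases j <;> simp [List.cons_prefix_cons]
  · -- TUE at j = 2
    intro h2
    obtain ⟨r2, rfl⟩ := h2
    exact hA (List.IsInfix.trans (List.IsPrefix.isInfix ⟨r2, by simp⟩) hs.isInfix)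
  · -- THU at j = 2
    intro h2
    obtain ⟨r2, rfl⟩ := h2
    exact hB (List.IsInfix.trans (List.IsPrefix.isInfix ⟨r2, by simp⟩) hs.isInfix)

theorem portA_eq (schedule : String) :
    (convert_schedule_to_cron_py schedule).toList =
      repOne ['S','U','N'] ['0'] (repOne ['S','A','T'] ['6'] (repOne ['F','R','I'] ['5']
        (repOne ['T','H','U'] ['4'] (repOne ['W','E','D'] ['3'] (repOne ['T','U','E'] ['2']
          (repOne ['M','O','N'] ['1'] schedule.toList)))))) := by
  show (List.foldl (fun cron p => PySem.Str.replace cron p.1 p.2) schedule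
      [("MON","1"),("TUE","2"),("WED","3"),("THU","4"),("FRI","5"),("SAT","6"),("SUN","0")]).toList = _
  simp only [List.foldl_cons, List.foldl_nil]
  simp only [PySem.Str.toList_replace]
  rw [replace_eq_repOne _ _ _ (by decide)]
  rw [replace_eq_repOne _ _ _ (by decide)]
  rw [replace_eq_repOne _ _ _ (by decide)]
  rw [replace_eq_repOne _ _ _ (by decide)]
  rw [replace_eq_repOne _ _ _ (by decide)]
  rw [replace_eq_repOne _ _ _ (by decide)]
  rw [replace_eq_repOne _ _ _ (by decide)]
  rfl

theorem ports_agree (schedule : String)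
    (hA : ¬ (['S','A','T','U','E'] <:+: schedule.toList))
    (hB : ¬ (['S','A','T','H','U'] <:+: schedule.toList)) :
    convert_schedule_to_cron_py schedule = convert_schedule_to_cron_py_alt schedule := by
  rw [← String.toList_inj, portA_eq]
  have htl : (convert_schedule_to_cron_py_alt schedule).toList = repM pvDayList schedule.toList := by
    rw [convert_schedule_to_cron_py_alt, String.toList_ofList, pvScanB_eq_repM]
  rw [htl]
  have e1 : repOne ['M','O','N'] ['1'] schedule.toList
      = repM [(['M','O','N'],['1'])] schedule.toList := by
    have h := fuse [] ['M','O','N'] ['1'] 'M' ['O','N'] rfl (by decide)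
      (by intro c hc; fin_cases hc <;> decide)
      (by intro p hp; exact absurd hp (by simp))
      (by intro p hp; exact absurd hp (by simp))
      schedule.toList
      (by intro s _ _ p hp; exact absurd hp (by simp))
    rwa [repM_nil] at h
  have e2 := fuse [(['M','O','N'],['1'])] ['T','U','E'] ['2'] 'T' ['U','E'] rfl (by decide)
    (by intro c hc; fin_cases hc <;> decide)
    (by intro p hp c hc; fin_cases hp; fin_cases hc; decide)
    (by intro p hp; fin_cases hp; simp)
    schedule.toList (hov_headmiss _ _ hovTUE schedule.toList)
  have e3 := fuse [(['M','O','N'],['1']),(['T','U','E'],['2'])] ['W','E','D'] ['3'] 'W' ['E','D'] rfl (by decide)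
    (by intro c hc; fin_cases hc <;> decide)
    (by intro p hp c hc; fin_cases hp <;> fin_cases hc <;> decide)
    (by intro p hp; fin_cases hp <;> simp)
    schedule.toList (hov_headmiss _ _ hovWED schedule.toList)
  have e4 := fuse [(['M','O','N'],['1']),(['T','U','E'],['2']),(['W','E','D'],['3'])] ['T','H','U'] ['4'] 'T' ['H','U'] rfl (by decide)
    (by intro c hc; fin_cases hc <;> decide)
    (by intro p hp c hc; fin_cases hp <;> fin_cases hc <;> decide)
    (by intro p hp; fin_cases hp <;> simp)
    schedule.toList (hov_headmiss _ _ hovTHU schedule.toList)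
  have e5 := fuse [(['M','O','N'],['1']),(['T','U','E'],['2']),(['W','E','D'],['3']),(['T','H','U'],['4'])] ['F','R','I'] ['5'] 'F' ['R','I'] rfl (by decide)
    (by intro c hc; fin_cases hc <;> decide)
    (by intro p hp c hc; fin_cases hp <;> fin_cases hc <;> decide)
    (by intro p hp; fin_cases hp <;> simp)
    schedule.toList (hov_headmiss _ _ hovFRI schedule.toList)
  have e6 := fuse [(['M','O','N'],['1']),(['T','U','E'],['2']),(['W','E','D'],['3']),(['T','H','U'],['4']),(['F','R','I'],['5'])] ['S','A','T'] ['6'] 'S' ['A','T'] rfl (by decide)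
    (by intro c hc; fin_cases hc <;> decide)
    (by intro p hp c hc; fin_cases hp <;> fin_cases hc <;> decide)
    (by intro p hp; fin_cases hp <;> simp)
    schedule.toList (hovSAT schedule.toList hA hB)
  have e7 := fuse [(['M','O','N'],['1']),(['T','U','E'],['2']),(['W','E','D'],['3']),(['T','H','U'],['4']),(['F','R','I'],['5']),(['S','A','T'],['6'])] ['S','U','N'] ['0'] 'S' ['U','N'] rfl (by decide)
    (by intro c hc; fin_cases hc <;> decide)
    (by intro p hp c hc; fin_cases hp <;> fin_cases hc <;> decide)
    (by intro p hp; fin_cases hp <;> simp)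
    schedule.toList (hov_headmiss _ _ hovSUN schedule.toList)
  simp only [List.cons_append, List.nil_append] at e2 e3 e4 e5 e6 e7
  rw [e1, e2, e3, e4, e5, e6, e7]
  rfl

-- ===== VERDICT (by name: the statement is the Claim_ definition above) =====
theorem convert_schedule_to_cron_py_spec : Claim_equal_convert_schedule_to_cron_py := by
  intro schedule _ hpre
  obtain ⟨-, hsA, hsB⟩ := hpre
  unfold Spec_convert_schedule_to_cron_py
  apply ports_agree
  · intro hinf
    have h := (PySem.Str.isIn_iff_infix "SATUE" schedule).mpr hinf
    rw [hsA] at h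
    exact Bool.false_ne_true h
  · intro hinf
    have h := (PySem.Str.isIn_iff_infix "SATHU" schedule).mpr hinf
    rw [hsB] at h
    exact Bool.false_ne_true h
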